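-- pv_equiv track=rewrite | github.com/key-moon/golf | base_code_minified/task066.py | p
-- ===== SOURCE A (Python) =====
-- def p(g):
-- 	F,G=len(g),len(g[0]);H=min(A for B in g for A in B if A not in(0,2,8));C,D=next((A,B)for A in range(F)for B in range(G)if g[A][B]==H);E=[(C,D)]
-- 	while E:
-- 		C,D=E.pop()
-- 		for(I,J)in((1,0),(-1,0),(0,1),(0,-1)):
-- 			A,B=C+I,D+J
-- 			if 0<=A<F and 0<=B<G and g[A][B]==0:g[A][B]=H;E.append((A,B))
-- 	return g
-- ===== SOURCE B (Python) =====
-- def p(g):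
--     F, G = len(g), len(g[0])
--     H = min(v for row in g for v in row if v not in (0, 2, 8))
--     sa, sb = next((a, b) for a in range(F) for b in range(G) if g[a][b] == H)
--     vis = [[a == sa and b == sb for b in range(G)] for a in range(F)]
--     for _ in range(F * G):
--         new = [[vis[a][b] or (g[a][b] == 0 and any(
--                     0 <= a + i < F and 0 <= b + j < G and vis[a + i][b + j]
--                     for i, j in ((1, 0), (-1, 0), (0, 1), (0, -1))))
--                 for b in range(G)] for a in range(F)]
--         if new == vis:
--             break
--         vis = new
--     return [[H if g[a][b] == 0 and vis[a][b] else g[a][b] for b in range(G)] for a in range(F)]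
-- ===== Notes on version B (the rewrite author's own statement) =====
-- stated objective: alternative
-- what changed: Replaces the in-place DFS with an explicit stack (grid mutated as the visited marker) by a synchronous fixed-point iteration: a boolean visited grid seeded at the min cell is re-derived from its previous value (a cell becomes visited when it is zero and has a visited neighbour) until it stops changing (at most F*G rounds), followed by a pure grid reconstruction; the input list is not modified.
-- outside the precondition, e.g. on p([[1], [3, 4]]): A returns [[1], [3, 4]], B returns [[1], [3]]
import Mathlib
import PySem

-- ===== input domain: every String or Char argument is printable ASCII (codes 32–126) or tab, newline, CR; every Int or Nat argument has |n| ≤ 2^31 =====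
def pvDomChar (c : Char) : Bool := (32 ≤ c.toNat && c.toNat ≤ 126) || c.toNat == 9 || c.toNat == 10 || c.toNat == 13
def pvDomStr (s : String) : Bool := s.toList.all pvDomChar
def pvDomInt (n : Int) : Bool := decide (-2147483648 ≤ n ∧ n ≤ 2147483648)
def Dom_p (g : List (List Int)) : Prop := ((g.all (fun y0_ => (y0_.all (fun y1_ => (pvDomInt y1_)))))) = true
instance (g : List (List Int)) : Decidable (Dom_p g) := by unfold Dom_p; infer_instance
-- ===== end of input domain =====

-- B replaces A's in-place DFS (explicit stack, grid mutated as visited marker) by a round-based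
-- synchronous fixed-point iteration of a boolean visited grid, then a pure grid reconstruction;
-- equivalence is about the RETURN value only (A mutates its argument in place, B does not).

-- ===== PORT A =====
-- shared grid-read primitive (both Pythons index g the same way)
def gget (g : List (List Int)) (a b : Int) : Int := (g.getD a.toNat []).getD b.toNat 0

def gset (g : List (List Int)) (a b v : Int) : List (List Int) :=
  g.set a.toNat ((g.getD a.toNat []).set b.toNat v)

def offs : List (Int × Int) := [(1, 0), (-1, 0), (0, 1), (0, -1)]

-- 'A not in (0, 2, 8)'
def keepv (v : Int) : Bool := !(v == 0 || v == 2 || v == 8)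

-- '(A,B) for A in range(F) for B in range(G)'
def allPos (F G : Int) : List (Int × Int) :=
  (List.range F.toNat).flatMap
    (fun (a : Nat) => (List.range G.toNat).map (fun (b : Nat) => ((a : Int), (b : Int))))

-- body of A's inner 'for (I,J) in …' loop: maybe fill one neighbour and push it
def pAStep (F G H c d : Int) (st : List (List Int) × List (Int × Int)) (o : Int × Int) :
    List (List Int) × List (Int × Int) :=
  let a := c + o.1
  let b := d + o.2
  if 0 ≤ a ∧ a < F ∧ 0 ≤ b ∧ b < G ∧ gget st.1 a b = 0 then
    (gset st.1 a b H, (a, b) :: st.2)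
  else st

-- A's 'while E:' loop; stack stored top-first (Python append/pop work at the same end);
-- the fuel only makes the recursion structural — it is proved large enough under Pre_p
def pALoop (F G H : Int) : Nat → List (List Int) → List (Int × Int) → List (List Int)
  | _, g, [] => g
  | 0, g, _ => g
  | fuel + 1, g, (c, d) :: E =>
    let st := offs.foldl (pAStep F G H c d) (g, E)
    pALoop F G H fuel st.1 st.2

def p (g : List (List Int)) : List (List Int) :=
  let F : Int := g.length
  let G : Int := (g.getD 0 []).length
  match PySem.List.min? (g.flatten.filter keepv) (fun v => v) with
  | none => g      -- Python raises ValueError here (outside Pre_p)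
  | some H =>
    match (allPos F G).find? (fun q => gget g q.1 q.2 == H) with
    | none => g    -- Python raises StopIteration here (outside Pre_p)
    | some seed => pALoop F G H (2 * g.flatten.length + 1) g [seed]

-- ===== PORT B =====
-- B's neighbour-offset tuple '((1,0),(-1,0),(0,1),(0,-1))'
def nbrs : List (Int × Int) := [(1, 0), (-1, 0), (0, 1), (0, -1)]

-- vis[a][b] on a boolean grid
def bget (v : List (List Bool)) (a b : Int) : Bool := (v.getD a.toNat []).getD b.toNat false

-- '[[a == sa and b == sb for b in range(G)] for a in range(F)]'
def bseed (F G : Nat) (sa sb : Int) : List (List Bool) :=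
  (List.range F).map fun (a : Nat) => (List.range G).map fun (b : Nat) =>
    (((a : Nat) : Int) == sa) && (((b : Nat) : Int) == sb)

-- one cell of the rebuilt visited grid:
-- 'vis[a][b] or (g[a][b] == 0 and any(0<=a+i<F and 0<=b+j<G and vis[a+i][b+j] for i,j in …))'
def bcell (g : List (List Int)) (F G : Int) (v : List (List Bool)) (a b : Int) : Bool :=
  bget v a b ||
    (gget g a b == 0 &&
      nbrs.any fun o =>
        decide (0 ≤ a + o.1) && decide (a + o.1 < F) && decide (0 ≤ b + o.2) &&
          decide (b + o.2 < G) && bget v (a + o.1) (b + o.2))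

-- one full round: the whole visited grid re-derived from its previous value
def bstep (g : List (List Int)) (F G : Int) (v : List (List Bool)) : List (List Bool) :=
  (List.range F.toNat).map fun a => (List.range G.toNat).map fun b =>
    bcell g F G v ((a : Nat) : Int) ((b : Nat) : Int)

-- 'for _ in range(F*G): new = …; if new == vis: break; vis = new'
def brounds (g : List (List Int)) (F G : Int) : Nat → List (List Bool) → List (List Bool)
  | 0, v => v
  | k + 1, v =>
    let w := bstep g F G v
    if w = v then v else brounds g F G k w

def p_alt (g : List (List Int)) : List (List Int) :=
  let F : Int := g.length
  let G : Int := (g.getD 0 []).length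
  match PySem.List.min? (g.flatten.filter keepv) (fun v => v) with
  | none => g      -- Python raises ValueError here (outside Pre_p)
  | some H =>
    match (allPos F G).find? (fun q => gget g q.1 q.2 == H) with
    | none => g    -- Python raises StopIteration here (outside Pre_p)
    | some seed =>
      let vis := brounds g F G (F.toNat * G.toNat) (bseed F.toNat G.toNat seed.1 seed.2)
      (List.range F.toNat).map fun a => (List.range G.toNat).map fun b =>
        if gget g ((a : Nat) : Int) ((b : Nat) : Int) == 0 &&
            bget vis ((a : Nat) : Int) ((b : Nat) : Int) then H
        else gget g ((a : Nat) : Int) ((b : Nat) : Int)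

-- ===== PRECONDITION & SPEC =====
-- Pre_p keeps the natural domain of the task: non-empty RECTANGULAR grids containing at least one
-- value outside {0,2,8}.  Outside it Python A raises (ValueError/StopIteration/IndexError) on all
-- but some ragged grids, where behaviour relative to len(g[0]) is accidental; grids are rectangular
-- by the task's nature, so those are excluded rather than modelled.
def Pre_p (g : List (List Int)) : Prop :=
  g ≠ [] ∧ (∀ r ∈ g, r.length = (g.getD 0 []).length) ∧ g.flatten.filter keepv ≠ []

instance (g : List (List Int)) : Decidable (Pre_p g) := by unfold Pre_p; infer_instance

def pvWitness_p : List (List Int) := [[5, 0], [0, 0]]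

def Spec_p (g : List (List Int)) (out : List (List Int)) : Prop := out = p_alt g
instance (g : List (List Int)) (out : List (List Int)) : Decidable (Spec_p g out) := by
  unfold Spec_p; infer_instance

-- ===== CLAIM (what is proved, stated in full; the proofs are below) =====
def Claim_equal_p : Prop := ∀ (g : List (List Int)), Dom_p g → Pre_p g → Spec_p g (p g)

-- ===== LEMMAS AND PROOFS =====

-- in-bounds positions, the "still fillable" predicate, and reachability
def inB (F G : Int) (q : Int × Int) : Prop := 0 ≤ q.1 ∧ q.1 < F ∧ 0 ≤ q.2 ∧ q.2 < G

def ZwA (F G : Int) (g : List (List Int)) (q : Int × Int) : Prop := inB F G q ∧ gget g q.1 q.2 = 0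

def adjP (e q : Int × Int) : Prop := ∃ o ∈ offs, q = (e.1 + o.1, e.2 + o.2)

inductive ReachFrom (Z : Int × Int → Prop) (W : List (Int × Int)) : Int × Int → Prop
  | base (e q) (he : e ∈ W) (ha : adjP e q) (hz : Z q) : ReachFrom Z W q
  | step (p q) (hp : ReachFrom Z W p) (ha : adjP p q) (hz : Z q) : ReachFrom Z W q

-- the component A floods (and B's fixed point collects): zero cells reachable from the seed
def Rch (F G : Int) (g0 : List (List Int)) (seed : Int × Int) : Int × Int → Prop :=
  ReachFrom (ZwA F G g0) [seed]

def ShpFG (F G : Int) (g : List (List Int)) : Prop :=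
  g.length = F.toNat ∧ ∀ r ∈ g, r.length = G.toNat

def NzA (F G : Int) (g : List (List Int)) : Nat :=
  (allPos F G).countP (fun q => decide (gget g q.1 q.2 = 0))

-- A-loop invariant (g0/F/G/H/seed fixed): shape, pointwise soundness, stack soundness, completeness
def InvA (F G H : Int) (g0 : List (List Int)) (seed : Int × Int)
    (g' : List (List Int)) (E : List (Int × Int)) : Prop :=
  ShpFG F G g' ∧
  (∀ q, inB F G q → gget g' q.1 q.2 = gget g0 q.1 q.2 ∨
    (Rch F G g0 seed q ∧ gget g' q.1 q.2 = H ∧ gget g0 q.1 q.2 = 0)) ∧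
  (∀ x ∈ E, (Rch F G g0 seed x ∨ x = seed) ∧ inB F G x ∧ gget g' x.1 x.2 ≠ 0) ∧
  (∀ q, Rch F G g0 seed q → ZwA F G g' q → ReachFrom (ZwA F G g') E q)

-- proof-side pure iteration (no early exit); the port's early-exit loop equals it
def bitr (g : List (List Int)) (F G : Int) : Nat → List (List Bool) → List (List Bool)
  | 0, v => v
  | k + 1, v => bitr g F G k (bstep g F G v)

-- B-side: truth of one cell of the k-th visited grid, as a predicate
def Sk (g : List (List Int)) (F G : Int) (seed : Int × Int) (k : Nat) (q : Int × Int) : Prop :=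
  inB F G q ∧
    bget (bitr g F G k (bseed F.toNat G.toNat seed.1 seed.2)) q.1 q.2 = true

-- ---------- generic small lemmas ----------

lemma countP_update {α : Type} (l : List α) (f f' : α → Bool) (x : α)
    (hnd : l.Nodup) (hx : x ∈ l) (hf : f x = true) (hf' : f' x = false)
    (hagree : ∀ y ∈ l, y ≠ x → f' y = f y) : l.countP f' + 1 = l.countP f := by
  induction l with
  | nil => cases hx
  | cons y t ih =>
    rw [List.nodup_cons] at hnd
    rcases List.mem_cons.1 hx with rfl | hxt
    · have ht : t.countP f' = t.countP f := by
        apply List.countP_congr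
        intro z hz
        rw [hagree z (List.mem_cons_of_mem _ hz) (fun h => hnd.1 (h ▸ hz))]
      rw [List.countP_cons, List.countP_cons, hf, hf', ht]
      simp
    · have hyx : y ≠ x := fun h => hnd.1 (h ▸ hxt)
      have h1 := ih hnd.2 hxt (fun z hz hne => hagree z (List.mem_cons_of_mem _ hz) hne)
      rw [List.countP_cons, List.countP_cons, hagree y (List.mem_cons_self) hyx]
      omega

lemma countP_lt {α : Type} (l : List α) (f f' : α → Bool)
    (hmono : ∀ x ∈ l, f x = true → f' x = true) (x : α) (hx : x ∈ l)
    (h1 : f x = false) (h2 : f' x = true) : l.countP f < l.countP f' := by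
  obtain ⟨s, t, rfl⟩ := List.append_of_mem hx
  rw [List.countP_append, List.countP_append, List.countP_cons, List.countP_cons, h1, h2]
  have hs := List.countP_mono_left
    (l := s) (p := f) (q := f') (fun a ha => hmono a (by simp [ha]))
  have ht := List.countP_mono_left
    (l := t) (p := f) (q := f') (fun a ha => hmono a (by simp [ha]))
  simp only [Bool.false_eq_true, if_false, if_true]
  omega

lemma mem_allPos {F G : Int} {q : Int × Int} : q ∈ allPos F G ↔ inB F G q := by
  obtain ⟨q1, q2⟩ := q
  constructor
  · intro h
    rw [allPos, List.mem_flatMap] at h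
    obtain ⟨a, ha, h⟩ := h
    rw [List.mem_map] at h
    obtain ⟨b, hb, h⟩ := h
    rw [List.mem_range] at ha
    rw [List.mem_range] at hb
    rw [Prod.ext_iff] at h
    obtain ⟨h1, h2⟩ := h
    simp only at h1 h2
    refine ⟨?_, ?_, ?_, ?_⟩ <;> omega
  · rintro ⟨h1, h2, h3, h4⟩
    rw [allPos, List.mem_flatMap]
    refine ⟨q1.toNat, by rw [List.mem_range]; omega, ?_⟩
    rw [List.mem_map]
    refine ⟨q2.toNat, by rw [List.mem_range]; omega, ?_⟩
    rw [Prod.ext_iff]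
    constructor <;> simp <;> omega

lemma nodup_allPos {F G : Int} : (allPos F G).Nodup := by
  rw [allPos, List.nodup_flatMap]
  constructor
  · intro a _
    apply List.Nodup.map _ List.nodup_range
    intro x y h
    rw [Prod.ext_iff] at h
    simp only at h
    exact_mod_cast h.2
  · apply List.Pairwise.imp_of_mem _ List.nodup_range
    intro a b ha hb hab x hx hy
    simp only [List.mem_map] at hx hy
    obtain ⟨u, _, hu⟩ := hx
    obtain ⟨v, _, hv⟩ := hy
    rw [← hu, Prod.ext_iff] at hv
    simp only at hv
    exact hab (by exact_mod_cast hv.1.symm)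

lemma length_allPos {F G : Int} : (allPos F G).length = F.toNat * G.toNat := by
  simp [allPos]

lemma offs_shift_ne {e : Int × Int} {o : Int × Int} (ho : o ∈ offs) :
    (e.1 + o.1, e.2 + o.2) ≠ e := by
  intro h
  rw [Prod.ext_iff] at h
  obtain ⟨h1, h2⟩ := h
  simp only [offs, List.mem_cons, List.not_mem_nil, or_false] at ho
  rcases ho with rfl | rfl | rfl | rfl <;> simp_all

lemma neg_mem_nbrs_of_mem_offs {o : Int × Int} (h : o ∈ offs) : (-o.1, -o.2) ∈ nbrs := by
  simp only [offs, List.mem_cons, List.not_mem_nil, or_false] at h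
  rcases h with rfl | rfl | rfl | rfl <;> decide

lemma neg_mem_offs_of_mem_nbrs {o : Int × Int} (h : o ∈ nbrs) : (-o.1, -o.2) ∈ offs := by
  simp only [nbrs, List.mem_cons, List.not_mem_nil, or_false] at h
  rcases h with rfl | rfl | rfl | rfl <;> decide

lemma gget_eq_getElem {g : List (List Int)} {a b : Int} (ha : a.toNat < g.length)
    (hb : b.toNat < (g[a.toNat]).length) : gget g a b = g[a.toNat][b.toNat] := by
  rw [gget, List.getD_eq_getElem g [] ha, List.getD_eq_getElem _ 0 hb]

lemma gget_eq_getElem_nat {g : List (List Int)} {i j : Nat} (hi : i < g.length)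
    (hj : j < (g[i]).length) : gget g (i : Int) (j : Int) = g[i][j] :=
  gget_eq_getElem (a := (i : Int)) (b := (j : Int)) hi hj

lemma inrange_row {F G a : Int} {g : List (List Int)} (hs : ShpFG F G g)
    (h1 : 0 ≤ a) (h2 : a < F) : a.toNat < g.length := by
  rw [hs.1]; omega

lemma inrange_col {F G b : Int} {g : List (List Int)} (hs : ShpFG F G g) {i : Nat}
    (hi : i < g.length) (h3 : 0 ≤ b) (h4 : b < G) : b.toNat < (g[i]).length := by
  rw [hs.2 g[i] (List.getElem_mem hi)]; omega

lemma gget_gset_self {g : List (List Int)} {a b v : Int} (ha : a.toNat < g.length)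
    (hb : b.toNat < (g[a.toNat]).length) : gget (gset g a b v) a b = v := by
  rw [gget, gset]
  rw [List.getD_eq_getElem _ [] (by simpa using ha), List.getElem_set_self (by simpa using ha)]
  rw [List.getD_eq_getElem g [] ha]
  rw [List.getD_eq_getElem _ 0 (by simpa using hb), List.getElem_set_self]

lemma gget_gset_ne {g : List (List Int)} {a b a' b' v : Int} (hne : (a, b) ≠ (a', b'))
    (h0a : 0 ≤ a) (h0b : 0 ≤ b) (h0a' : 0 ≤ a') (h0b' : 0 ≤ b') :
    gget (gset g a b v) a' b' = gget g a' b' := by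
  by_cases hA : a = a'
  · subst hA
    have hB : b.toNat ≠ b'.toNat := by
      intro h
      exact hne (by rw [Prod.mk.injEq]; exact ⟨rfl, by omega⟩)
    by_cases hi : a.toNat < g.length
    · rw [gget, gget, gset]
      rw [List.getD_eq_getElem _ [] (by simpa using hi), List.getElem_set_self (by simpa using hi)]
      rw [List.getD_eq_getElem g [] hi]
      simp only [List.getD_eq_getElem?_getD]
      rw [List.getElem?_set_ne hB]
    · have h1 : (g.set a.toNat ((g.getD a.toNat []).set b.toNat v))[a.toNat]? = none := by
        rw [List.getElem?_eq_none_iff]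
        simpa using Nat.le_of_not_lt hi
      have h2 : g[a.toNat]? = none := List.getElem?_eq_none (Nat.le_of_not_lt hi)
      rw [gget, gget, gset]
      simp only [List.getD_eq_getElem?_getD] at h1 ⊢
      rw [h1, h2]
  · have hAn : a.toNat ≠ a'.toNat := by omega
    rw [gget, gget, gset]
    simp only [List.getD_eq_getElem?_getD]
    rw [List.getElem?_set_ne hAn]

lemma shp_gset {F G : Int} {g : List (List Int)} {a b v : Int} (hs : ShpFG F G g)
    (ha : a.toNat < g.length) : ShpFG F G (gset g a b v) := by
  refine ⟨by simpa [gset] using hs.1, ?_⟩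
  intro r hr
  rcases List.mem_or_eq_of_mem_set hr with h | rfl
  · exact hs.2 r h
  · rw [List.length_set, List.getD_eq_getElem g [] ha]
    exact hs.2 _ (List.getElem_mem ha)

-- ---------- ReachFrom lemmas ----------

lemma reachFrom_nil {Z : Int × Int → Prop} {q : Int × Int} : ¬ ReachFrom Z [] q := by
  intro h
  induction h with
  | base e q he ha hz => cases he
  | step p q hp ha hz ih => exact ih

lemma reachFrom_Z {Z : Int × Int → Prop} {W : List (Int × Int)} {q : Int × Int}
    (h : ReachFrom Z W q) : Z q := by
  cases h <;> assumption

-- repairing completeness after filling exactly the cell n and pushing it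
lemma reachFrom_fill {Z Z' : Int × Int → Prop} {W : List (Int × Int)} {n q : Int × Int}
    (hZ' : ∀ x, Z' x ↔ (Z x ∧ x ≠ n)) (h : ReachFrom Z W q) (hq : Z' q) :
    ReachFrom Z' (n :: W) q := by
  have aux : ∀ r, ReachFrom Z W r → r = n ∨ ReachFrom Z' (n :: W) r := by
    intro r hr
    induction hr with
    | base e q he ha hz =>
      by_cases hqn : q = n
      · exact Or.inl hqn
      · exact Or.inr (ReachFrom.base e q (List.mem_cons_of_mem _ he) ha ((hZ' q).2 ⟨hz, hqn⟩))
    | step p q hp ha hz ih =>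
      by_cases hqn : q = n
      · exact Or.inl hqn
      · rcases ih with rfl | hR
        · exact Or.inr (ReachFrom.base p q (List.mem_cons_self) ha ((hZ' q).2 ⟨hz, hqn⟩))
        · exact Or.inr (ReachFrom.step p q hR ha ((hZ' q).2 ⟨hz, hqn⟩))
  rcases aux q h with rfl | hR
  · exact absurd hq (by simp [hZ'])
  · exact hR

-- once every neighbour of e is dead, e can be dropped from the worklist
lemma reachFrom_drop {Z : Int × Int → Prop} {W : List (Int × Int)} {e q : Int × Int}
    (hdead : ∀ o ∈ offs, ¬ Z (e.1 + o.1, e.2 + o.2)) (h : ReachFrom Z (e :: W) q) :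
    ReachFrom Z W q := by
  induction h with
  | base e' q he ha hz =>
    rcases List.mem_cons.1 he with rfl | hW
    · obtain ⟨o, ho, rfl⟩ := ha
      exact absurd hz (hdead o ho)
    · exact ReachFrom.base e' q hW ha hz
  | step p q hp ha hz ih => exact ReachFrom.step p q ih ha hz

lemma reachFrom_monoW {Z : Int × Int → Prop} {W W' : List (Int × Int)} {q : Int × Int}
    (hW : ∀ x ∈ W, x ∈ W') (h : ReachFrom Z W q) : ReachFrom Z W' q := by
  induction h with
  | base e q he ha hz => exact ReachFrom.base e q (hW e he) ha hz
  | step p q hp ha hz ih => exact ReachFrom.step p q ih ha hz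

-- ---------- A-side loop correctness ----------

lemma pAStep_shp {F G H c d : Int} {st : List (List Int) × List (Int × Int)} {o : Int × Int}
    (hs : ShpFG F G st.1) : ShpFG F G (pAStep F G H c d st o).1 := by
  rw [pAStep]
  split
  · next h => exact shp_gset hs (inrange_row hs h.1 h.2.1)
  · exact hs

lemma pAStep_guard_iff {F G c d : Int} {st : List (List Int) × List (Int × Int)}
    {o : Int × Int} :
    (0 ≤ c + o.1 ∧ c + o.1 < F ∧ 0 ≤ d + o.2 ∧ d + o.2 < G ∧ gget st.1 (c + o.1) (d + o.2) = 0)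
      ↔ ZwA F G st.1 (c + o.1, d + o.2) := by
  rw [ZwA, inB]
  tauto

lemma pAStep_dead_mono {F G H c d : Int} {st : List (List Int) × List (Int × Int)}
    {o q : Int × Int} (hH : H ≠ 0) (hs : ShpFG F G st.1) (hd : ¬ ZwA F G st.1 q) :
    ¬ ZwA F G (pAStep F G H c d st o).1 q := by
  rw [pAStep]
  split
  · next h =>
    intro hz
    apply hd
    refine ⟨hz.1, ?_⟩
    by_cases hqn : (c + o.1, d + o.2) = (q.1, q.2)
    · exfalso
      have h1 := inrange_row hs h.1 h.2.1
      have h2 := inrange_col hs h1 h.2.2.1 h.2.2.2.1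
      have hs2 : gget (gset st.1 (c + o.1) (d + o.2) H) (c + o.1) (d + o.2) = H :=
        gget_gset_self h1 h2
      rw [Prod.ext_iff] at hqn
      simp only at hqn
      have hz2 : gget (gset st.1 (c + o.1) (d + o.2) H) q.1 q.2 = 0 := hz.2
      rw [← hqn.1, ← hqn.2] at hz2
      rw [hz2] at hs2
      exact hH hs2.symm
    · have heq := gget_gset_ne (v := H) (g := st.1) hqn h.1 h.2.2.1 hz.1.1 hz.1.2.2.1
      rw [← heq]
      exact hz.2
  · exact hd

lemma foldA_dead_mono {F G H c d : Int} {q : Int × Int} (hH : H ≠ 0) :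
    ∀ (os : List (Int × Int)) (st : List (List Int) × List (Int × Int)),
      ShpFG F G st.1 → ¬ ZwA F G st.1 q →
      ¬ ZwA F G (os.foldl (pAStep F G H c d) st).1 q := by
  intro os
  induction os with
  | nil => intro st _ hd; exact hd
  | cons o os ih =>
    intro st hs hd
    exact ih _ (pAStep_shp hs) (pAStep_dead_mono hH hs hd)

-- the mid-loop invariant while the popped cell e's neighbours are being processed
def MidA (F G H : Int) (g0 : List (List Int)) (seed e : Int × Int)
    (g' : List (List Int)) (E : List (Int × Int)) : Prop :=
  ShpFG F G g' ∧
  (∀ q, inB F G q → gget g' q.1 q.2 = gget g0 q.1 q.2 ∨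
    (Rch F G g0 seed q ∧ gget g' q.1 q.2 = H ∧ gget g0 q.1 q.2 = 0)) ∧
  (∀ x ∈ E, (Rch F G g0 seed x ∨ x = seed) ∧ inB F G x ∧ gget g' x.1 x.2 ≠ 0) ∧
  ((Rch F G g0 seed e ∨ e = seed) ∧ inB F G e ∧ gget g' e.1 e.2 ≠ 0) ∧
  (∀ q, Rch F G g0 seed q → ZwA F G g' q → ReachFrom (ZwA F G g') (e :: E) q)

lemma foldA_main {F G H : Int} {g0 : List (List Int)} {seed e : Int × Int} (hH : H ≠ 0) :
    ∀ (os : List (Int × Int)) (g' : List (List Int)) (E : List (Int × Int)),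
      (∀ o ∈ os, o ∈ offs) → MidA F G H g0 seed e g' E →
      MidA F G H g0 seed e (os.foldl (pAStep F G H e.1 e.2) (g', E)).1
        (os.foldl (pAStep F G H e.1 e.2) (g', E)).2 ∧
      (os.foldl (pAStep F G H e.1 e.2) (g', E)).2.length +
        2 * NzA F G (os.foldl (pAStep F G H e.1 e.2) (g', E)).1 ≤
        E.length + 2 * NzA F G g' ∧
      (∀ o ∈ os, ¬ ZwA F G (os.foldl (pAStep F G H e.1 e.2) (g', E)).1
        (e.1 + o.1, e.2 + o.2)) := by
  intro os
  induction os with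
  | nil =>
    intro g' E _ hm
    exact ⟨hm, le_refl _, by simp⟩
  | cons o os ih =>
    intro g' E hsub hm
    obtain ⟨hshp, hpt, hstk, he, hcomp⟩ := hm
    have ho : o ∈ offs := hsub o List.mem_cons_self
    have hsub' : ∀ o' ∈ os, o' ∈ offs := fun o' h => hsub o' (List.mem_cons_of_mem _ h)
    rw [List.foldl_cons]
    by_cases hg : 0 ≤ e.1 + o.1 ∧ e.1 + o.1 < F ∧ 0 ≤ e.2 + o.2 ∧ e.2 + o.2 < G ∧
        gget g' (e.1 + o.1) (e.2 + o.2) = 0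
    · -- the neighbour n is filled and pushed
      set n : Int × Int := (e.1 + o.1, e.2 + o.2) with hn
      have hstep : pAStep F G H e.1 e.2 (g', E) o = (gset g' n.1 n.2 H, n :: E) := by
        rw [pAStep, if_pos hg]
      have hinBn : inB F G n := ⟨hg.1, hg.2.1, hg.2.2.1, hg.2.2.2.1⟩
      have hrow := inrange_row hshp hg.1 hg.2.1
      have hcol := inrange_col hshp hrow hg.2.2.1 hg.2.2.2.1
      have hg1self : gget (gset g' n.1 n.2 H) n.1 n.2 = H := gget_gset_self hrow hcol
      have hg1ne : ∀ q : Int × Int, inB F G q → q ≠ n →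
          gget (gset g' n.1 n.2 H) q.1 q.2 = gget g' q.1 q.2 := by
        intro q hq hqn
        refine gget_gset_ne ?_ hg.1 hg.2.2.1 hq.1 hq.2.2.1
        intro hc
        exact hqn (by rw [← Prod.mk.eta (p := q), ← Prod.mk.eta (p := n), hc])
      have hg0n : gget g0 n.1 n.2 = 0 := by
        rcases hpt n hinBn with h | h
        · rw [← h, hg.2.2.2.2]
        · exact absurd hg.2.2.2.2 (by rw [h.2.1]; exact hH)
      have hRn : Rch F G g0 seed n := by
        have hadj : adjP e n := ⟨o, ho, rfl⟩
        have hzn : ZwA F G g0 n := ⟨hinBn, hg0n⟩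
        rcases he.1 with hr | rfl
        · exact ReachFrom.step e n hr hadj hzn
        · exact ReachFrom.base e n List.mem_cons_self hadj hzn
      have hshp1 : ShpFG F G (gset g' n.1 n.2 H) := shp_gset hshp hrow
      have hZiff : ∀ x, ZwA F G (gset g' n.1 n.2 H) x ↔ (ZwA F G g' x ∧ x ≠ n) := by
        intro x
        constructor
        · intro hx
          have hxn : x ≠ n := by
            rintro rfl
            rw [hx.2] at hg1self
            exact hH hg1self.symm
          exact ⟨⟨hx.1, by rw [← hg1ne x hx.1 hxn, hx.2]⟩, hxn⟩
        · rintro ⟨hx, hxn⟩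
          exact ⟨hx.1, by rw [hg1ne x hx.1 hxn, hx.2]⟩
      have hmid1 : MidA F G H g0 seed e (gset g' n.1 n.2 H) (n :: E) := by
        refine ⟨hshp1, ?_, ?_, ?_, ?_⟩
        · intro q hq
          by_cases hqn : q = n
          · subst hqn
            exact Or.inr ⟨hRn, hg1self, hg0n⟩
          · rw [hg1ne q hq hqn]
            exact hpt q hq
        · intro x hx
          rcases List.mem_cons.1 hx with rfl | hxE
          · exact ⟨Or.inl hRn, hinBn, by rw [hg1self]; exact hH⟩
          · obtain ⟨h1, h2, h3⟩ := hstk x hxE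
            have hxn : x ≠ n := by
              rintro rfl
              exact h3 hg.2.2.2.2
            exact ⟨h1, h2, by rw [hg1ne x h2 hxn]; exact h3⟩
        · have hen : e ≠ n := (offs_shift_ne ho).symm
          exact ⟨he.1, he.2.1, by rw [hg1ne e he.2.1 hen]; exact he.2.2⟩
        · intro q hq hz
          have hz' : ZwA F G g' q := ((hZiff q).1 hz).1
          have hold := hcomp q hq hz'
          have hrep := reachFrom_fill hZiff hold hz
          exact reachFrom_monoW (by intro x hx; simp at hx ⊢; tauto) hrep
      have hcnt : NzA F G (gset g' n.1 n.2 H) + 1 = NzA F G g' := by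
        simp only [NzA]
        refine countP_update (allPos F G) _ _ n nodup_allPos (mem_allPos.2 hinBn)
          (by show decide (gget g' (e.1 + o.1) (e.2 + o.2) = 0) = true
              simp [hg.2.2.2.2]) (by simp [hg1self, hH]) ?_
        intro y hy hyn
        have hyB := mem_allPos.1 hy
        simp only [decide_eq_decide]
        rw [hg1ne y hyB hyn]
      obtain ⟨hmidf, hmeas, hdead⟩ := ih (gset g' n.1 n.2 H) (n :: E) hsub' hmid1
      rw [hstep]
      refine ⟨hmidf, by simp at hmeas ⊢; omega, ?_⟩
      intro o' ho'
      rcases List.mem_cons.1 ho' with rfl | ho's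
      · have hdn : ¬ ZwA F G (gset g' n.1 n.2 H) n := by
          intro hz
          rw [hz.2] at hg1self
          exact hH hg1self.symm
        exact foldA_dead_mono hH os _ hshp1 hdn
      · exact hdead o' ho's
    · -- guard false: nothing happens for this offset
      have hstep : pAStep F G H e.1 e.2 (g', E) o = (g', E) := by
        rw [pAStep, if_neg hg]
      rw [hstep]
      have hdn : ¬ ZwA F G g' (e.1 + o.1, e.2 + o.2) := by
        intro hz
        exact hg ((pAStep_guard_iff (c := e.1) (d := e.2) (st := (g', E)) (o := o)).2 hz)
      obtain ⟨hmidf, hmeas, hdead⟩ := ih g' E hsub' ⟨hshp, hpt, hstk, he, hcomp⟩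
      refine ⟨hmidf, hmeas, ?_⟩
      intro o' ho'
      rcases List.mem_cons.1 ho' with rfl | ho's
      · exact foldA_dead_mono hH os _ hshp hdn
      · exact hdead o' ho's

lemma pALoop_nil {F G H : Int} {g : List (List Int)} :
    ∀ f, pALoop F G H f g [] = g := by
  intro f
  cases f <;> rfl

lemma invA_final {F G H : Int} {g0 : List (List Int)} {seed : Int × Int}
    {g' : List (List Int)} (hinv : InvA F G H g0 seed g' []) :
    ShpFG F G g' ∧
    (∀ q, inB F G q →
      (Rch F G g0 seed q → gget g' q.1 q.2 = H) ∧
      (¬ Rch F G g0 seed q → gget g' q.1 q.2 = gget g0 q.1 q.2)) := by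
  obtain ⟨hshp, hpt, _, hcomp⟩ := hinv
  refine ⟨hshp, ?_⟩
  intro q hq
  constructor
  · intro hr
    have hz0 : gget g0 q.1 q.2 = 0 := (reachFrom_Z hr).2
    by_cases hzz : gget g' q.1 q.2 = 0
    · exact absurd (hcomp q hr ⟨hq, hzz⟩) reachFrom_nil
    · rcases hpt q hq with h | h
      · exact absurd (h.trans hz0) hzz
      · exact h.2.1
  · intro hnr
    rcases hpt q hq with h | h
    · exact h
    · exact absurd h.1 hnr

lemma pALoop_correct (F G H : Int) (g0 : List (List Int)) (seed : Int × Int) (hH : H ≠ 0) :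
    ∀ (fuel : Nat) (g' : List (List Int)) (E : List (Int × Int)),
      InvA F G H g0 seed g' E → E.length + 2 * NzA F G g' ≤ fuel →
      ShpFG F G (pALoop F G H fuel g' E) ∧
      (∀ q, inB F G q →
        (Rch F G g0 seed q → gget (pALoop F G H fuel g' E) q.1 q.2 = H) ∧
        (¬ Rch F G g0 seed q → gget (pALoop F G H fuel g' E) q.1 q.2 = gget g0 q.1 q.2)) := by
  intro fuel
  induction fuel with
  | zero =>
    intro g' E hinv hb
    cases E with
    | nil =>
      rw [pALoop_nil]
      exact invA_final hinv
    | cons x E' => simp at hb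
  | succ f ihf =>
    intro g' E hinv hb
    cases E with
    | nil =>
      rw [pALoop_nil]
      exact invA_final hinv
    | cons e E' =>
      obtain ⟨c, d⟩ := e
      obtain ⟨hshp, hpt, hstk, hcomp⟩ := hinv
      have hmid : MidA F G H g0 seed (c, d) g' E' := by
        refine ⟨hshp, hpt, fun x hx => hstk x (List.mem_cons_of_mem _ hx),
          hstk (c, d) List.mem_cons_self, hcomp⟩
      obtain ⟨hmid2, hmeas, hdead⟩ :=
        foldA_main (e := (c, d)) hH offs g' E' (fun o ho => ho) hmid
      dsimp only at hmid2 hmeas hdead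
      obtain ⟨hshp2, hpt2, hstk2, he2, hcomp2⟩ := hmid2
      have hinv2 : InvA F G H g0 seed
          (offs.foldl (pAStep F G H c d) (g', E')).1
          (offs.foldl (pAStep F G H c d) (g', E')).2 := by
        refine ⟨hshp2, hpt2, hstk2, ?_⟩
        intro q hr hz
        exact reachFrom_drop hdead (hcomp2 q hr hz)
      have hb2 : (offs.foldl (pAStep F G H c d) (g', E')).2.length +
          2 * NzA F G (offs.foldl (pAStep F G H c d) (g', E')).1 ≤ f := by
        simp only [List.length_cons] at hb
        omega
      show ShpFG F G (pALoop F G H f _ _) ∧ _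
      exact ihf _ _ hinv2 hb2

-- ---------- B-side: the synchronous fixed-point iteration ----------

lemma bitr_fixed (g : List (List Int)) (F G : Int) :
    ∀ (k : Nat) (v : List (List Bool)), bstep g F G v = v → bitr g F G k v = v := by
  intro k
  induction k with
  | zero => intro v _; rfl
  | succ k ih =>
    intro v h
    show bitr g F G k (bstep g F G v) = v
    rw [h]
    exact ih v h

lemma brounds_eq_bitr (g : List (List Int)) (F G : Int) :
    ∀ (k : Nat) (v : List (List Bool)), brounds g F G k v = bitr g F G k v := by
  intro k
  induction k with
  | zero => intro v; rfl
  | succ k ih =>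
    intro v
    show (if bstep g F G v = v then v else brounds g F G k (bstep g F G v))
        = bitr g F G k (bstep g F G v)
    by_cases h : bstep g F G v = v
    · rw [if_pos h, h, bitr_fixed g F G k v h]
    · rw [if_neg h, ih]

lemma bitr_comm (g : List (List Int)) (F G : Int) :
    ∀ (k : Nat) (v : List (List Bool)),
      bitr g F G (k + 1) v = bstep g F G (bitr g F G k v) := by
  intro k
  induction k with
  | zero => intro v; rfl
  | succ k ih =>
    intro v
    calc bitr g F G (k + 2) v = bitr g F G (k + 1) (bstep g F G v) := rfl
    _ = bstep g F G (bitr g F G k (bstep g F G v)) := ih _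
    _ = bstep g F G (bitr g F G (k + 1) v) := rfl

lemma bget_map_range {F G : Nat} (f : Nat → Nat → Bool) {a b : Int}
    (h1 : 0 ≤ a) (h2 : a < (F : Int)) (h3 : 0 ≤ b) (h4 : b < (G : Int)) :
    bget ((List.range F).map fun x => (List.range G).map fun y => f x y) a b
      = f a.toNat b.toNat := by
  have ha : a.toNat < F := by omega
  have hb : b.toNat < G := by omega
  simp [bget, List.getD_eq_getElem?_getD, ha, hb]

lemma bget_bseed {F G : Nat} (sa sb : Int) {a b : Int}
    (h1 : 0 ≤ a) (h2 : a < (F : Int)) (h3 : 0 ≤ b) (h4 : b < (G : Int)) :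
    bget (bseed F G sa sb) a b = (a == sa && b == sb) := by
  simp only [bseed]
  rw [bget_map_range (f := fun x y => (((x : Nat) : Int) == sa && ((y : Nat) : Int) == sb))
    h1 h2 h3 h4]
  rw [Int.toNat_of_nonneg h1, Int.toNat_of_nonneg h3]

lemma bget_bstep {g : List (List Int)} {F G : Int} {v : List (List Bool)} {a b : Int}
    (hF : 0 ≤ F) (hG : 0 ≤ G)
    (h1 : 0 ≤ a) (h2 : a < F) (h3 : 0 ≤ b) (h4 : b < G) :
    bget (bstep g F G v) a b = bcell g F G v a b := by
  simp only [bstep]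
  rw [bget_map_range (f := fun x y => bcell g F G v ((x : Nat) : Int) ((y : Nat) : Int))
    h1 (by omega) h3 (by omega)]
  rw [Int.toNat_of_nonneg h1, Int.toNat_of_nonneg h3]

lemma Sk_zero {g : List (List Int)} {F G : Int} {seed : Int × Int} {q : Int × Int}
    (hF : 0 ≤ F) (hG : 0 ≤ G) :
    Sk g F G seed 0 q ↔ inB F G q ∧ q.1 = seed.1 ∧ q.2 = seed.2 := by
  constructor
  · rintro ⟨hin, hb⟩
    obtain ⟨h1, h2, h3, h4⟩ := hin
    rw [show bitr g F G 0 (bseed F.toNat G.toNat seed.1 seed.2)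
        = bseed F.toNat G.toNat seed.1 seed.2 from rfl] at hb
    rw [bget_bseed seed.1 seed.2 h1 (by omega) h3 (by omega)] at hb
    rw [Bool.and_eq_true, beq_iff_eq, beq_iff_eq] at hb
    exact ⟨⟨h1, h2, h3, h4⟩, hb⟩
  · rintro ⟨hin, hq1, hq2⟩
    obtain ⟨h1, h2, h3, h4⟩ := hin
    refine ⟨⟨h1, h2, h3, h4⟩, ?_⟩
    rw [show bitr g F G 0 (bseed F.toNat G.toNat seed.1 seed.2)
        = bseed F.toNat G.toNat seed.1 seed.2 from rfl]
    rw [bget_bseed seed.1 seed.2 h1 (by omega) h3 (by omega)]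
    rw [Bool.and_eq_true, beq_iff_eq, beq_iff_eq]
    exact ⟨hq1, hq2⟩

lemma Sk_succ {g : List (List Int)} {F G : Int} {seed : Int × Int} {k : Nat} {q : Int × Int}
    (hF : 0 ≤ F) (hG : 0 ≤ G) :
    Sk g F G seed (k + 1) q ↔
      Sk g F G seed k q ∨
        (inB F G q ∧ gget g q.1 q.2 = 0 ∧
          ∃ o ∈ nbrs, Sk g F G seed k (q.1 + o.1, q.2 + o.2)) := by
  constructor
  · rintro ⟨hin, hb⟩
    obtain ⟨h1, h2, h3, h4⟩ := hin
    rw [bitr_comm, bget_bstep hF hG h1 h2 h3 h4] at hb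
    simp only [bcell, Bool.or_eq_true, Bool.and_eq_true, List.any_eq_true,
      decide_eq_true_eq, beq_iff_eq] at hb
    rcases hb with hb | ⟨hz, o, ho, hguards⟩
    · exact Or.inl ⟨⟨h1, h2, h3, h4⟩, hb⟩
    · obtain ⟨⟨⟨⟨hg1, hg2⟩, hg3⟩, hg4⟩, hbv⟩ := hguards
      exact Or.inr ⟨⟨h1, h2, h3, h4⟩, hz, o, ho, ⟨⟨hg1, hg2, hg3, hg4⟩, hbv⟩⟩
  · rintro (⟨hin, hb⟩ | ⟨hin, hz, o, ho, ⟨hnin, hnb⟩⟩)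
    · obtain ⟨h1, h2, h3, h4⟩ := hin
      refine ⟨⟨h1, h2, h3, h4⟩, ?_⟩
      rw [bitr_comm, bget_bstep hF hG h1 h2 h3 h4]
      simp only [bcell, Bool.or_eq_true]
      exact Or.inl hb
    · obtain ⟨h1, h2, h3, h4⟩ := hin
      refine ⟨⟨h1, h2, h3, h4⟩, ?_⟩
      rw [bitr_comm, bget_bstep hF hG h1 h2 h3 h4]
      simp only [bcell, Bool.or_eq_true, Bool.and_eq_true, List.any_eq_true,
        decide_eq_true_eq, beq_iff_eq]
      refine Or.inr ⟨hz, o, ho, ⟨⟨⟨⟨hnin.1, hnin.2.1⟩, hnin.2.2.1⟩, hnin.2.2.2⟩, hnb⟩⟩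

lemma Sk_mono {g : List (List Int)} {F G : Int} {seed : Int × Int} {k : Nat} {q : Int × Int}
    (hF : 0 ≤ F) (hG : 0 ≤ G) (h : Sk g F G seed k q) : Sk g F G seed (k + 1) q :=
  (Sk_succ hF hG).2 (Or.inl h)

lemma Sk_mono_add {g : List (List Int)} {F G : Int} {seed : Int × Int} {k : Nat}
    {q : Int × Int} (hF : 0 ≤ F) (hG : 0 ≤ G) :
    ∀ j, Sk g F G seed k q → Sk g F G seed (k + j) q := by
  intro j
  induction j with
  | zero => exact fun h => h
  | succ j ih => exact fun h => Sk_mono hF hG (ih h)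

lemma Sk_sound {g : List (List Int)} {F G : Int} {seed : Int × Int}
    (hF : 0 ≤ F) (hG : 0 ≤ G) :
    ∀ (k : Nat) (q : Int × Int), Sk g F G seed k q → q = seed ∨ Rch F G g seed q := by
  intro k
  induction k with
  | zero =>
    intro q h
    have h0 := (Sk_zero hF hG).1 h
    exact Or.inl (Prod.ext_iff.2 ⟨h0.2.1, h0.2.2⟩)
  | succ k ih =>
    intro q h
    rcases (Sk_succ hF hG).1 h with h | ⟨hin, hz, o, ho, hn⟩
    · exact ih q h
    · right
      have hzq : ZwA F G g q := ⟨hin, hz⟩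
      have hadj : adjP (q.1 + o.1, q.2 + o.2) q := by
        refine ⟨(-o.1, -o.2), neg_mem_offs_of_mem_nbrs ho, ?_⟩
        rw [Prod.ext_iff]
        constructor <;> dsimp only <;> ring
      rcases ih _ hn with heq | hr
      · exact ReachFrom.base (q.1 + o.1, q.2 + o.2) q (by rw [heq]; exact List.mem_singleton.2 rfl)
          hadj hzq
      · exact ReachFrom.step (q.1 + o.1, q.2 + o.2) q hr hadj hzq

lemma Sk_complete {g : List (List Int)} {F G : Int} {seed : Int × Int} {k : Nat}
    (hF : 0 ≤ F) (hG : 0 ≤ G)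
    (hfix : ∀ q, Sk g F G seed (k + 1) q ↔ Sk g F G seed k q)
    (hseedS : Sk g F G seed k seed) :
    ∀ q, Rch F G g seed q → Sk g F G seed k q := by
  intro q hq
  induction hq with
  | base e q he ha hz =>
    have hs' : Sk g F G seed k e := by rw [List.mem_singleton.1 he]; exact hseedS
    obtain ⟨o, ho, rfl⟩ := ha
    apply (hfix _).1
    apply (Sk_succ hF hG).2
    right
    refine ⟨hz.1, hz.2, (-o.1, -o.2), neg_mem_nbrs_of_mem_offs ho, ?_⟩
    have hback : (e.1 + o.1 + -o.1, e.2 + o.2 + -o.2) = e := by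
      rw [Prod.ext_iff]
      constructor <;> dsimp only <;> omega
    dsimp only
    rw [hback]
    exact hs'
  | step e q hp ha hz ih =>
    obtain ⟨o, ho, rfl⟩ := ha
    apply (hfix _).1
    apply (Sk_succ hF hG).2
    right
    refine ⟨hz.1, hz.2, (-o.1, -o.2), neg_mem_nbrs_of_mem_offs ho, ?_⟩
    have hback : (e.1 + o.1 + -o.1, e.2 + o.2 + -o.2) = e := by
      rw [Prod.ext_iff]
      constructor <;> dsimp only <;> omega
    dsimp only
    rw [hback]
    exact ih

lemma Sk_final (g : List (List Int)) (F G : Int) (seed : Int × Int)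
    (hF : 0 ≤ F) (hG : 0 ≤ G) (hseed : inB F G seed) :
    ∀ q, Sk g F G seed (F.toNat * G.toNat) q ↔ (q = seed ∨ Rch F G g seed q) := by
  have hS0 : Sk g F G seed 0 seed := (Sk_zero hF hG).2 ⟨hseed, rfl, rfl⟩
  have hSk_seed : ∀ k, Sk g F G seed k seed := by
    intro k
    simpa using Sk_mono_add (k := 0) hF hG k hS0
  have hfixex : ∃ k, k ≤ F.toNat * G.toNat ∧
      ∀ q, Sk g F G seed (k + 1) q ↔ Sk g F G seed k q := by
    by_contra hno
    push Not at hno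
    have hstep : ∀ k, k < F.toNat * G.toNat →
        ∃ q, Sk g F G seed (k + 1) q ∧ ¬ Sk g F G seed k q := by
      intro k hk
      obtain ⟨q, hq⟩ := hno k (le_of_lt hk)
      rcases hq with ⟨h2, h1⟩ | ⟨h2, h1⟩
      · exact ⟨q, h2, h1⟩
      · exact absurd (Sk_mono hF hG h1) h2
    have hcnt : ∀ k, k ≤ F.toNat * G.toNat → k + 1 ≤
        (allPos F G).countP
          (fun q => bget (bitr g F G k (bseed F.toNat G.toNat seed.1 seed.2)) q.1 q.2) := by
      intro k
      induction k with
      | zero =>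
        intro _
        rw [Nat.succ_le_iff]
        rw [List.countP_pos_iff]
        exact ⟨seed, mem_allPos.2 hseed, hS0.2⟩
      | succ k ih =>
        intro hk
        obtain ⟨q, hq1, hq0⟩ := hstep k (by omega)
        have hqmem : q ∈ allPos F G := mem_allPos.2 hq1.1
        have hqf : bget (bitr g F G k (bseed F.toNat G.toNat seed.1 seed.2)) q.1 q.2
            = false := by
          cases hbv : bget (bitr g F G k (bseed F.toNat G.toNat seed.1 seed.2)) q.1 q.2 with
          | true => exact absurd ⟨hq1.1, hbv⟩ hq0
          | false => rfl
        have hlt := countP_lt (allPos F G)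
          (fun q => bget (bitr g F G k (bseed F.toNat G.toNat seed.1 seed.2)) q.1 q.2)
          (fun q => bget (bitr g F G (k + 1) (bseed F.toNat G.toNat seed.1 seed.2)) q.1 q.2)
          (by
            intro x hxmem hxb
            exact (Sk_mono hF hG ⟨mem_allPos.1 hxmem, hxb⟩).2)
          q hqmem hqf hq1.2
        have hih := ih (by omega)
        omega
    have hle := List.countP_le_length
      (l := allPos F G)
      (p := fun q => bget (bitr g F G (F.toNat * G.toNat)
        (bseed F.toNat G.toNat seed.1 seed.2)) q.1 q.2)
    rw [length_allPos] at hle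
    have := hcnt (F.toNat * G.toNat) le_rfl
    omega
  obtain ⟨k, hkN, hfx⟩ := hfixex
  have hprop : ∀ j q, Sk g F G seed (k + j) q ↔ Sk g F G seed k q := by
    intro j
    induction j with
    | zero => exact fun q => Iff.rfl
    | succ j ih =>
      intro q
      rw [show k + (j + 1) = (k + j) + 1 from rfl]
      rw [Sk_succ hF hG]
      constructor
      · rintro (h | ⟨hin, hz, o, ho, hn⟩)
        · exact (ih q).1 h
        · apply (hfx q).1
          apply (Sk_succ hF hG).2
          exact Or.inr ⟨hin, hz, o, ho, (ih _).1 hn⟩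
      · intro h
        exact Or.inl ((ih q).2 h)
  intro q
  have hNk : F.toNat * G.toNat = k + (F.toNat * G.toNat - k) := by omega
  rw [hNk, hprop]
  constructor
  · intro h
    exact Sk_sound hF hG k q h
  · rintro (rfl | hr)
    · exact hSk_seed k
    · exact Sk_complete hF hG hfx (hSk_seed k) q hr

-- ---------- assembly ----------

theorem p_eq_palt (g : List (List Int)) (hpre : Pre_p g) : p g = p_alt g := by
  obtain ⟨hne, hrect, hfil⟩ := hpre
  unfold p p_alt
  cases hmin : PySem.List.min? (g.flatten.filter keepv) (fun v => v) with
  | none => rfl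
  | some H =>
    cases hseed : (allPos (g.length : Int) (((g.getD 0 []).length : Nat) : Int)).find?
        (fun q => gget g q.1 q.2 == H) with
    | none => simp only [hseed]
    | some seed =>
      simp only [hseed]
      -- name the fixed data
      have hH0 : H ≠ 0 := by
        have hmem := PySem.List.min?_mem hmin
        have hk := (List.mem_filter.1 hmem).2
        simp only [keepv, Bool.not_eq_true', Bool.or_eq_false_iff, beq_eq_false_iff_ne] at hk
        exact hk.1.1
      have hseedmem := List.mem_of_find?_eq_some hseed
      have hseedB : inB (g.length : Int) ((g.getD 0 []).length : Int) seed :=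
        mem_allPos.1 hseedmem
      have hseedval : gget g seed.1 seed.2 = H := by
        have := List.find?_some hseed
        simpa using this
      have hshp0 : ShpFG (g.length : Int) ((g.getD 0 []).length : Int) g := by
        constructor
        · simp
        · intro r hr
          rw [hrect r hr]
          simp
      have hflat : g.flatten.length = g.length * (g.getD 0 []).length := by
        rw [List.length_flatten]
        have : g.map List.length = List.replicate g.length (g.getD 0 []).length := by
          have hlen : (g.map List.length).length = g.length := List.length_map ..
          rw [← hlen]
          apply List.eq_replicate_of_mem
          intro b hb
          rw [List.mem_map] at hb
          obtain ⟨r, hr, rfl⟩ := hb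
          exact hrect r hr
        rw [this, List.sum_replicate, smul_eq_mul]
      have hcntbound : (allPos (g.length : Int) ((g.getD 0 []).length : Int)).length
          = g.flatten.length := by
        rw [length_allPos, hflat]
        simp
      -- A's loop
      have hinvA : InvA (g.length : Int) ((g.getD 0 []).length : Int) H g seed g [seed] := by
        refine ⟨hshp0, fun q _ => Or.inl rfl, ?_, ?_⟩
        · intro x hx
          rw [List.mem_singleton] at hx
          subst hx
          exact ⟨Or.inr rfl, hseedB, by rw [hseedval]; exact hH0⟩
        · intro q hq _
          exact hq
      have hbA : (1 : Nat) + 2 * NzA (g.length : Int) ((g.getD 0 []).length : Int) g ≤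
          2 * g.flatten.length + 1 := by
        have := List.countP_le_length
          (l := allPos (g.length : Int) ((g.getD 0 []).length : Int))
          (p := fun q => decide (gget g q.1 q.2 = 0))
        rw [hcntbound] at this
        rw [NzA]
        omega
      obtain ⟨hshpA, hptA⟩ := pALoop_correct (g.length : Int) ((g.getD 0 []).length : Int)
        H g seed hH0 (2 * g.flatten.length + 1) g [seed] hinvA (by simpa using hbA)
      -- B's fixed point
      have hBchar := Sk_final g (g.length : Int) ((g.getD 0 []).length : Int) seed
        (by positivity) (by positivity) hseedB
      -- list-level equality
      apply List.ext_getElem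
      · rw [hshpA.1]
        simp
      · intro i h1 h2
        have hiA : i < g.length := by
          have h1' := h1
          rw [hshpA.1] at h1'
          omega
        have hrowmem : (pALoop (g.length : Int) ((g.getD 0 []).length : Int) H
            (2 * g.flatten.length + 1) g [seed])[i] ∈ _ := List.getElem_mem h1
        have hrowlenA := hshpA.2 _ hrowmem
        apply List.ext_getElem
        · rw [hrowlenA]
          simp only [List.getElem_map, List.getElem_range, List.length_map, List.length_range]
        · intro j hj1 hj2
          have hjG : j < (g.getD 0 []).length := by
            rw [hrowlenA] at hj1
            simpa using hj1
          have hjrow : j < g[i].length := by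
            rw [hrect g[i] (List.getElem_mem hiA)]
            exact hjG
          have hinBq : inB (g.length : Int) ((g.getD 0 []).length : Int)
              ((i : Int), (j : Int)) := by
            rw [inB]
            dsimp only
            omega
          have hlhs : (pALoop (g.length : Int) ((g.getD 0 []).length : Int) H
              (2 * g.flatten.length + 1) g [seed])[i][j] =
              gget (pALoop (g.length : Int) ((g.getD 0 []).length : Int) H
                (2 * g.flatten.length + 1) g [seed]) (i : Int) (j : Int) := by
            exact (gget_eq_getElem_nat h1 (by rw [hrowlenA]; omega)).symm
          have hrhs : ((List.range ((g.length : Int)).toNat).map fun a =>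
              (List.range (((g.getD 0 []).length : Int)).toNat).map fun b =>
                if gget g ((a : Nat) : Int) ((b : Nat) : Int) == 0 &&
                    bget (brounds g (g.length : Int) ((g.getD 0 []).length : Int)
                      (((g.length : Int)).toNat * (((g.getD 0 []).length : Int)).toNat)
                      (bseed ((g.length : Int)).toNat (((g.getD 0 []).length : Int)).toNat
                        seed.1 seed.2)) ((a : Nat) : Int) ((b : Nat) : Int) then H
                else gget g ((a : Nat) : Int) ((b : Nat) : Int))[i][j]
              = (if gget g (i : Int) (j : Int) == 0 &&
                  bget (brounds g (g.length : Int) ((g.getD 0 []).length : Int)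
                    (((g.length : Int)).toNat * (((g.getD 0 []).length : Int)).toNat)
                    (bseed ((g.length : Int)).toNat (((g.getD 0 []).length : Int)).toNat
                      seed.1 seed.2)) (i : Int) (j : Int) then H
                else gget g (i : Int) (j : Int)) := by
            simp only [List.getElem_map, List.getElem_range]
          refine hlhs.trans (Eq.trans ?_ hrhs.symm)
          rw [brounds_eq_bitr]
          by_cases hr : Rch (g.length : Int) ((g.getD 0 []).length : Int) g seed
              ((i : Int), (j : Int))
          · rw [(hptA _ hinBq).1 hr]
            have hSq : Sk g (g.length : Int) ((g.getD 0 []).length : Int) seed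
                (((g.length : Int)).toNat * (((g.getD 0 []).length : Int)).toNat)
                ((i : Int), (j : Int)) := (hBchar _).2 (Or.inr hr)
            have hz : gget g (i : Int) (j : Int) = 0 := (reachFrom_Z hr).2
            rw [if_pos]
            rw [Bool.and_eq_true, beq_iff_eq]
            exact ⟨hz, hSq.2⟩
          · rw [(hptA _ hinBq).2 hr]
            have hcond : (gget g (i : Int) (j : Int) == 0 &&
                bget (bitr g (g.length : Int) ((g.getD 0 []).length : Int)
                  (((g.length : Int)).toNat * (((g.getD 0 []).length : Int)).toNat)
                  (bseed ((g.length : Int)).toNat (((g.getD 0 []).length : Int)).toNat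
                    seed.1 seed.2)) (i : Int) (j : Int)) = false := by
              rw [Bool.and_eq_false_iff]
              by_cases hz : gget g (i : Int) (j : Int) = 0
              · right
                cases hbv : bget (bitr g (g.length : Int) ((g.getD 0 []).length : Int)
                    (((g.length : Int)).toNat * (((g.getD 0 []).length : Int)).toNat)
                    (bseed ((g.length : Int)).toNat (((g.getD 0 []).length : Int)).toNat
                      seed.1 seed.2)) (i : Int) (j : Int) with
                | false => rfl
                | true =>
                  exfalso
                  have hSq : Sk g (g.length : Int) ((g.getD 0 []).length : Int) seed
                      (((g.length : Int)).toNat * (((g.getD 0 []).length : Int)).toNat)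
                      ((i : Int), (j : Int)) := ⟨hinBq, hbv⟩
                  rcases (hBchar _).1 hSq with heq | hrr
                  · have e1 : (i : Int) = seed.1 := congrArg Prod.fst heq
                    have e2 : (j : Int) = seed.2 := congrArg Prod.snd heq
                    have : gget g (i : Int) (j : Int) = H := by rw [e1, e2]; exact hseedval
                    exact hH0 (by rw [← this, hz])
                  · exact hr hrr
              · left
                rw [beq_eq_false_iff_ne]
                exact hz
            rw [hcond]
            simp only [Bool.false_eq_true, if_false]

-- ===== VERDICT (by name: the statement is the Claim_ definition above) =====
theorem p_spec : Claim_equal_p := by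
  unfold Claim_equal_p
  intro g _ hpre
  unfold Spec_p
  exact p_eq_palt g hpre
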